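-- pv_equiv track=rewrite | github.com/alexozer/robert-frost-generator | robert_frost/gen.py | get_rhyme_sets
-- ===== SOURCE A (Python) =====
-- def get_rhyme_sets(database):
--     many_rhymes = sorted(list(database.keys()), key=lambda x: -len(database[x]['rhyming_words']))
--     unique_rhymes = []
--     while many_rhymes:
--         r = many_rhymes[0]
--         unique_rhymes.append(r)
--         r_rhymes = database[r]['rhyming_words']
--         many_rhymes = list(filter(
--             lambda x: len(database[x]['rhyming_words'].intersection(r_rhymes)) < len(r_rhymes) // 2,
--             many_rhymes,
--         ))
--
--     return unique_rhymes
-- ===== SOURCE B (Python) =====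
-- def get_rhyme_sets(database):
--     # Single forward pass over the size-sorted keys; a key is kept unless some
--     # already-selected key's rhyme set overlaps it by at least half that
--     # selected set's size (same pivot rule as the repeated-filter version).
--     order = sorted(database.keys(), key=lambda x: -len(database[x]['rhyming_words']))
--     selected = []
--     for x in order:
--         ws = database[x]['rhyming_words']
--         if not any(
--             len(ws.intersection(database[s]['rhyming_words']))
--             >= len(database[s]['rhyming_words']) // 2
--             for s in selected
--         ):
--             selected.append(x)
--     return selected
-- ===== Notes on version B (the rewrite author's own statement) =====
-- stated objective: simpler
-- what changed: Replaces A's destructive while-loop that repeatedly rebuilds the whole candidate list with filter() by one forward pass over the sorted keys that keeps a list of selected pivots and tests each key once against them.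
import Mathlib
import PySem

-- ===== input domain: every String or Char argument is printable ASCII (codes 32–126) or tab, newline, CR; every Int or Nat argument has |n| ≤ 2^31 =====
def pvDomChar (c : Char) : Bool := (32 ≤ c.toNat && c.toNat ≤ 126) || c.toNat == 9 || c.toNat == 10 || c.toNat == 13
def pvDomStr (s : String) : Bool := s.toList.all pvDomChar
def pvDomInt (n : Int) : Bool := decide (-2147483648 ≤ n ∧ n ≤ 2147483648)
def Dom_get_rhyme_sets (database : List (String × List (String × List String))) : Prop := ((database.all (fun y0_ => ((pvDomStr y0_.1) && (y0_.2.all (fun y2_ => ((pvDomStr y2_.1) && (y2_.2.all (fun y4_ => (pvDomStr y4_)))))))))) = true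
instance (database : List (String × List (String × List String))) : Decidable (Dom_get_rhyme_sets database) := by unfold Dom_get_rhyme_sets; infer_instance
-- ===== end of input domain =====

-- B replaces A's destructive repeated filter() rebuilding of the candidate list by a
-- single forward pass over the sorted keys against the list of already-selected pivots
-- (objective: simpler; same worst-case cost).

-- ===== PORT A =====
-- shared lookup helper: database[x]['rhyming_words'] as a Python set.
-- Exact under Pre_get_rhyme_sets (which rules out the KeyError on 'rhyming_words';
-- the outer key x always comes from database's own keys).
def pvRW (database : List (String × List (String × List String))) (x : String) : PySem.Set String :=
  PySem.Set.ofList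
    (((PySem.Dict.ofList
        ((PySem.Dict.ofList database).getD x [])).get? "rhyming_words").getD [])

-- the filter predicate of A's loop body (pivot set rr)
def pvKeep (database : List (String × List (String × List String)))
    (rr : PySem.Set String) (x : String) : Bool :=
  decide (PySem.Set.len (PySem.Set.inter (pvRW database x) rr)
            < PySem.Int.floordiv (PySem.Set.len rr) 2)

theorem pvKeep_self (database : List (String × List (String × List String))) (r : String) :
    pvKeep database (pvRW database r) r = false := by
  have hint : PySem.Set.inter (pvRW database r) (pvRW database r) = pvRW database r := by
    simp [PySem.Set.inter, List.filter_eq_self]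
  simp only [pvKeep, hint, PySem.Set.len, decide_eq_false_iff_not, not_lt]
  rw [PySem.Int.floordiv_eq_ediv_of_pos (by omega : (0:Int) < 2)]
  omega

theorem pvFilter_lt (database : List (String × List (String × List String)))
    (r : String) (rest : List String) :
    ((r :: rest).filter (pvKeep database (pvRW database r))).length < (r :: rest).length := by
  simp only [List.filter, pvKeep_self]
  exact Nat.lt_succ_of_le (List.length_filter_le _ _)

-- the while-loop of A: pop the head, append it, filter the whole list against it
def pvALoop (database : List (String × List (String × List String))) :
    List String → List String
  | [] => []
  | r :: rest =>
    let rr := pvRW database r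
    r :: pvALoop database ((r :: rest).filter (pvKeep database rr))
termination_by l => l.length
decreasing_by exact pvFilter_lt database r rest

def get_rhyme_sets (database : List (String × List (String × List String))) : List String :=
  pvALoop database
    (PySem.List.sorted (PySem.Dict.ofList database).keys
      (fun x => -(PySem.Set.len (pvRW database x))) false)

-- ===== PORT B =====
-- x is eliminated by an already-selected pivot s
def pvElim (database : List (String × List (String × List String)))
    (ws : PySem.Set String) (s : String) : Bool :=
  decide (PySem.Int.floordiv (PySem.Set.len (pvRW database s)) 2
            ≤ PySem.Set.len (PySem.Set.inter ws (pvRW database s)))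

def pvBLoop (database : List (String × List (String × List String)))
    (selected : List String) : List String → List String
  | [] => selected
  | x :: rest =>
    let ws := pvRW database x
    if selected.any (pvElim database ws) then
      pvBLoop database selected rest
    else
      pvBLoop database (selected ++ [x]) rest

def get_rhyme_sets_alt (database : List (String × List (String × List String))) : List String :=
  pvBLoop database []
    (PySem.List.sorted (PySem.Dict.ofList database).keys
      (fun x => -(PySem.Set.len (pvRW database x))) false)

-- ===== PRECONDITION & SPEC =====
-- Pre_ excludes exactly the databases whose (effective, post-duplicate-overwrite) values
-- lack the key 'rhyming_words', where Python A raises KeyError.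
def Pre_get_rhyme_sets (database : List (String × List (String × List String))) : Prop :=
  ∀ p ∈ (PySem.Dict.ofList database).items, "rhyming_words" ∈ p.2.map Prod.fst
instance (database : List (String × List (String × List String))) : Decidable (Pre_get_rhyme_sets database) := by unfold Pre_get_rhyme_sets; infer_instance

def pvWitness_get_rhyme_sets : (List (String × List (String × List String))) :=
  [("cat", [("rhyming_words", ["hat", "bat", "mat"])]),
   ("hat", [("rhyming_words", ["cat", "bat"])]),
   ("dog", [("rhyming_words", ["log"])])]

def Spec_get_rhyme_sets (database : List (String × List (String × List String))) (out : List String) : Prop := out = get_rhyme_sets_alt database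
instance (database : List (String × List (String × List String))) (out : List String) : Decidable (Spec_get_rhyme_sets database out) := by unfold Spec_get_rhyme_sets; infer_instance

-- ===== CLAIM (what is proved, stated in full; the proofs are below) =====
def Claim_equal_get_rhyme_sets : Prop := ∀ (database : List (String × List (String × List String))), Dom_get_rhyme_sets database → Pre_get_rhyme_sets database → Spec_get_rhyme_sets database (get_rhyme_sets database)

-- ===== LEMMAS AND PROOFS =====

-- pvKeep is the boolean negation of pvElim (same comparison, opposite side)
theorem pvKeep_eq_not_elim (database : List (String × List (String × List String)))
    (r x : String) :
    pvKeep database (pvRW database r) x = !pvElim database (pvRW database x) r := by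
  simp only [pvKeep, pvElim, ← decide_not, not_le]

-- B's pass ignores elements already eliminated by a selected pivot r:
-- filtering them out first does not change the result.
theorem pvBLoop_filter (database : List (String × List (String × List String)))
    (r : String) :
    ∀ (l selected : List String), r ∈ selected →
      pvBLoop database selected l
        = pvBLoop database selected (l.filter (pvKeep database (pvRW database r))) := by
  intro l
  induction l with
  | nil => intro selected _; rfl
  | cons x rest ih =>
    intro selected hr
    by_cases hk : pvKeep database (pvRW database r) x = true
    · have hfil : (x :: rest).filter (pvKeep database (pvRW database r))
          = x :: rest.filter (pvKeep database (pvRW database r)) := by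
        simp [List.filter, hk]
      rw [hfil]
      by_cases he : selected.any (pvElim database (pvRW database x)) = true
      · simp only [pvBLoop, he, if_pos]
        exact ih selected hr
      · simp only [pvBLoop, he, if_neg, Bool.false_eq_true, not_false_iff]
        exact ih (selected ++ [x]) (List.mem_append_left _ hr)
    · -- x is eliminated by r ∈ selected: B skips it, the filter drops it
      have hkf : pvKeep database (pvRW database r) x = false := by
        cases h : pvKeep database (pvRW database r) x
        · rfl
        · exact absurd h hk
      have helim : pvElim database (pvRW database x) r = true := by
        have := pvKeep_eq_not_elim database r x
        rw [hkf] at this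
        cases h : pvElim database (pvRW database x) r
        · rw [h] at this; exact absurd this.symm (by decide)
        · rfl
      have hany : selected.any (pvElim database (pvRW database x)) = true :=
        List.any_eq_true.mpr ⟨r, hr, helim⟩
      have hfil : (x :: rest).filter (pvKeep database (pvRW database r))
          = rest.filter (pvKeep database (pvRW database r)) := by
        simp [List.filter, hkf]
      rw [hfil]
      simp only [pvBLoop, hany, if_pos]
      exact ih selected hr

-- Main invariant: if no element of l is eliminated by any already-selected pivot,
-- B's pass from `selected` equals `selected` followed by A's destructive loop on l.
theorem pvLoop_agree (database : List (String × List (String × List String))) :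
    ∀ (n : Nat) (l selected : List String), l.length ≤ n →
      (∀ x ∈ l, selected.any (pvElim database (pvRW database x)) = false) →
      pvBLoop database selected l = selected ++ pvALoop database l := by
  intro n
  induction n with
  | zero =>
    intro l selected hn _
    have : l = [] := List.eq_nil_of_length_eq_zero (Nat.le_zero.mp hn)
    subst this
    simp [pvBLoop, pvALoop]
  | succ n ih =>
    intro l selected hn hno
    cases l with
    | nil => simp [pvBLoop, pvALoop]
    | cons r rest =>
      have hr := hno r (List.mem_cons_self)
      simp only [pvBLoop, hr, Bool.false_eq_true, if_neg, not_false_iff]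
      have hfil := pvBLoop_filter database r rest (selected ++ [r])
        (List.mem_append_right _ List.mem_cons_self)
      rw [hfil]
      have hlen : (rest.filter (pvKeep database (pvRW database r))).length ≤ n := by
        have := List.length_filter_le (pvKeep database (pvRW database r)) rest
        simp only [List.length_cons] at hn
        omega
      have hno' : ∀ x ∈ rest.filter (pvKeep database (pvRW database r)),
          (selected ++ [r]).any (pvElim database (pvRW database x)) = false := by
        intro x hx
        have hxr := List.of_mem_filter hx
        have hxm := List.mem_of_mem_filter hx
        have h1 := hno x (List.mem_cons_of_mem _ hxm)
        have h2 : pvElim database (pvRW database x) r = false := by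
          have := pvKeep_eq_not_elim database r x
          rw [hxr] at this
          cases h : pvElim database (pvRW database x) r
          · rfl
          · rw [h] at this; exact absurd this.symm (by decide)
        simp [List.any_append, h1, h2]
      rw [ih _ _ hlen hno']
      -- unfold one step of A's loop
      have hA : pvALoop database (r :: rest)
          = r :: pvALoop database (rest.filter (pvKeep database (pvRW database r))) := by
        rw [pvALoop]
        have : (r :: rest).filter (pvKeep database (pvRW database r))
            = rest.filter (pvKeep database (pvRW database r)) := by
          simp [List.filter, pvKeep_self]
        rw [this]
      rw [hA]
      simp

-- ===== VERDICT (by name: the statement is the Claim_ definition above) =====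
theorem get_rhyme_sets_spec : Claim_equal_get_rhyme_sets := by
  intro database _ _
  unfold Spec_get_rhyme_sets get_rhyme_sets get_rhyme_sets_alt
  exact (pvLoop_agree database _ _ [] (Nat.le_refl _) (by intro x _; rfl)).symm
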